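-- pv_equiv track=rewrite | github.com/953250587/leetcode-python | SwapAdjacentInLRString_MID_777.py | canTransform_1
-- ===== SOURCE A (Python) =====
-- def canTransform_1(start, end):
--     """
--     :type start: str
--     :type end: str
--     :rtype: bool
--     107MS
--     """
--
--     def rx(s):
--         return ''.join(s.split('X'))
--
--     def plc(s):
--         al = []
--         ar = []
--         for i, c in enumerate(s):
--             if c == 'L':
--                 al.append(i)
--             elif c == 'R':
--                 ar.append(i)
--         return [al, ar]
--
--     if rx(start) != rx(end):
--         return False
--     sl, sr = plc(start)
--     el, er = plc(end)
--     for i in range(len(sl)):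
--         if el[i] > sl[i]:
--             return False
--     for i in range(len(sr)):
--         if er[i] < sr[i]:
--             return False
--     return True
-- ===== SOURCE B (Python) =====
-- def canTransform_1(start, end):
--     s = [(c, i) for i, c in enumerate(start) if c != 'X']
--     e = [(c, i) for i, c in enumerate(end) if c != 'X']
--     if len(s) != len(e):
--         return False
--     return all(cs == ce and (ce != 'L' or ie <= i_) and (ce != 'R' or ie >= i_)
--                for (cs, i_), (ce, ie) in zip(s, e))
-- ===== Notes on version B (the rewrite author's own statement) =====
-- stated objective: simpler
-- what changed: A removes X's into a new string for equality, then builds separate L-index and R-index lists and checks them in two further index loops; B makes one aligned pass over the (char, index) pairs of the non-X characters of both strings, checking char equality and the L/R index inequalities in a single zip scan.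
import Mathlib
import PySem

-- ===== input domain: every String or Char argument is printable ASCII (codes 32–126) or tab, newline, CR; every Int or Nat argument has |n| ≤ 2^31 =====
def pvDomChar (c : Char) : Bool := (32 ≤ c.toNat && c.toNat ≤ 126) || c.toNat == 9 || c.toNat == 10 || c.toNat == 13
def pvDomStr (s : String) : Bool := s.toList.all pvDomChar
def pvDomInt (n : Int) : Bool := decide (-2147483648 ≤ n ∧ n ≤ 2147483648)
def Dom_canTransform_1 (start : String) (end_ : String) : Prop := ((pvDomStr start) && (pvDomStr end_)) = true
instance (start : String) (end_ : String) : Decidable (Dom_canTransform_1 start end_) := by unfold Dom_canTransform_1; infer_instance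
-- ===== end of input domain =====

-- B replaces A's three separate passes (X-free string equality plus L-index and R-index
-- list comparisons) by one aligned scan over the (char, index) pairs of the non-X
-- characters of both strings; objective: simpler, same asymptotic cost.

-- ===== PORT A =====
-- rx(s) = ''.join(s.split('X')); sep is the literal "X" (nonempty) so split? is never none: getD [] only totalizes
def pvRx (s : String) : String :=
  PySem.Str.join "" ((PySem.Str.split? s "X").getD [])

-- plc(s): one pass over enumerate(s) collecting L-indices and R-indices
def pvPlc (s : String) : List Int × List Int :=
  (PySem.List.enumerate s.toList).foldl
    (fun (p : List Int × List Int) ic =>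
      if ic.2 = 'L' then (p.1 ++ [ic.1], p.2)
      else if ic.2 = 'R' then (p.1, p.2 ++ [ic.1])
      else p)
    ([], [])

def canTransform_1 (start : String) (end_ : String) : Bool :=
  if pvRx start ≠ pvRx end_ then false
  else
    let sp := pvPlc start
    let ep := pvPlc end_
    -- el[i] / er[i]: getD 0 only totalizes the list indexing; under the rx guard the index lists have equal length, so the default is never read
    ((List.range sp.1.length).all (fun i => decide (ep.1.getD i 0 ≤ sp.1.getD i 0))) &&
    ((List.range sp.2.length).all (fun i => decide (sp.2.getD i 0 ≤ ep.2.getD i 0)))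

-- ===== PORT B =====
-- [(c, i) for i, c in enumerate(s) if c != 'X']
def pvPairs (l : List Char) : List (Char × Int) :=
  ((PySem.List.enumerate l).filter (fun p => p.2 ≠ 'X')).map (fun p => (p.2, p.1))

def canTransform_1_alt (start : String) (end_ : String) : Bool :=
  let s := pvPairs start.toList
  let e := pvPairs end_.toList
  if s.length ≠ e.length then false
  else (s.zip e).all (fun pq =>
    pq.1.1 == pq.2.1 && (pq.2.1 != 'L' || decide (pq.2.2 ≤ pq.1.2))
                     && (pq.2.1 != 'R' || decide (pq.1.2 ≤ pq.2.2)))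

-- ===== PRECONDITION & SPEC =====
def Spec_canTransform_1 (start : String) (end_ : String) (out : Bool) : Prop := out = canTransform_1_alt start end_
instance (start : String) (end_ : String) (out : Bool) : Decidable (Spec_canTransform_1 start end_ out) := by unfold Spec_canTransform_1; infer_instance

-- ===== CLAIM (what is proved, stated in full; the proofs are below) =====
def Claim_equal_canTransform_1 : Prop := ∀ (start : String) (end_ : String), Dom_canTransform_1 start end_ → Spec_canTransform_1 start end_ (canTransform_1 start end_)

-- ===== LEMMAS AND PROOFS =====

-- L-indices / R-indices of a (char, index) pair list
def pvLix (p : List (Char × Int)) : List Int :=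
  p.filterMap (fun ci => if ci.1 = 'L' then some ci.2 else none)
def pvRixl (p : List (Char × Int)) : List Int :=
  p.filterMap (fun ci => if ci.1 = 'R' then some ci.2 else none)

-- pvPairs generalized to an arbitrary start index s0
def pvP (l : List Char) (s0 : Int) : List (Char × Int) :=
  ((PySem.List.enumerate l s0).filter (fun p => p.2 ≠ 'X')).map (fun p => (p.2, p.1))

lemma pvP_cons (c : Char) (l : List Char) (s0 : Int) :
    pvP (c :: l) s0 = if c ≠ 'X' then (c, s0) :: pvP l (s0 + 1) else pvP l (s0 + 1) := by
  simp [pvP, PySem.List.enumerate_cons, List.filter]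
  split_ifs with h <;> simp_all

lemma pvPairs_eq (l : List Char) : pvPairs l = pvP l 0 := rfl

-- the splitOn.go fuel loop flattens to the X-free characters
lemma pv_go_flatten : ∀ (fuel : Nat) (l cur : List Char) (acc : List (List Char)),
    l.length ≤ fuel →
    (PySem.Chars.splitOn.go ['X'] fuel l cur acc).flatten
      = acc.reverse.flatten ++ cur.reverse ++ l.filter (· ≠ 'X') := by
  intro fuel
  induction fuel with
  | zero =>
    intro l cur acc h
    have : l = [] := List.eq_nil_of_length_eq_zero (Nat.le_zero.mp h)
    subst this
    rw [PySem.Chars.splitOn.go]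
    simp
  | succ n ih =>
    intro l cur acc h
    cases l with
    | nil =>
      rw [PySem.Chars.splitOn.go]
      · simp
      · omega
    | cons c rest =>
      rw [PySem.Chars.splitOn.go]
      by_cases hc : c = 'X'
      · subst hc
        have hp : ['X'].isPrefixOf ('X' :: rest) = true := by simp [List.isPrefixOf]
        rw [if_pos hp]
        rw [ih _ _ _ (by simpa using Nat.le_of_succ_le_succ h)]
        simp [List.filter]
      · have hp : ['X'].isPrefixOf (c :: rest) = false := by
          simp [List.isPrefixOf]
          exact fun h => absurd h.symm hc
        rw [if_neg (by simp [hp])]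
        rw [ih _ _ _ (by simpa using Nat.le_of_succ_le_succ h)]
        simp [List.filter, hc]

lemma pv_join_nil_flatten (parts : List (List Char)) :
    PySem.Chars.join [] parts = parts.flatten := by
  simp [PySem.Chars.join, List.intercalate]
  induction parts with
  | nil => simp
  | cons p ps ih => cases ps <;> simp_all [List.intersperse]

lemma pvRx_toList (s : String) : (pvRx s).toList = s.toList.filter (· ≠ 'X') := by
  have h := PySem.Str.split?_map s "X"
  have h2 : PySem.Chars.split? s.toList "X".toList = some (PySem.Chars.splitOn s.toList "X".toList) := by
    simp [PySem.Chars.split?]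
  rw [h2] at h
  cases hs : PySem.Str.split? s "X" with
  | none => simp [hs] at h
  | some parts =>
    simp [hs] at h
    unfold pvRx
    rw [hs]
    show (PySem.Str.join "" parts).toList = _
    rw [PySem.Str.join]
    rw [String.toList_ofList]
    have he : ("" : String).toList = [] := rfl
    rw [he, pv_join_nil_flatten, h]
    unfold PySem.Chars.splitOn
    rw [pv_go_flatten _ _ _ _ (by omega)]
    simp

-- plc's fold collects exactly the L- and R- indices of the non-X pairs
lemma pvPlc_fold : ∀ (l : List Char) (s0 : Int) (a b : List Int),
    (PySem.List.enumerate l s0).foldl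
      (fun (p : List Int × List Int) ic =>
        if ic.2 = 'L' then (p.1 ++ [ic.1], p.2)
        else if ic.2 = 'R' then (p.1, p.2 ++ [ic.1])
        else p) (a, b)
      = (a ++ pvLix (pvP l s0), b ++ pvRixl (pvP l s0)) := by
  intro l
  induction l with
  | nil => intro s0 a b; simp [pvP, pvLix, pvRixl, PySem.List.enumerate]
  | cons c rest ih =>
    intro s0 a b
    rw [PySem.List.enumerate_cons]
    rw [List.foldl_cons, ih]
    rw [pvP_cons]
    by_cases hc : c = 'X'
    · subst hc; simp [pvLix, pvRixl]
    · rw [if_pos hc]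
      by_cases hL : c = 'L'
      · subst hL; simp [pvLix, pvRixl]
      · by_cases hR : c = 'R'
        · subst hR; simp [pvLix, pvRixl]
        · simp [pvLix, pvRixl, hL, hR]

lemma pvFst_pairs : ∀ (l : List Char) (s0 : Int),
    (pvP l s0).map Prod.fst = l.filter (· ≠ 'X') := by
  intro l
  induction l with
  | nil => intro s0; simp [pvP, PySem.List.enumerate]
  | cons c rest ih =>
    intro s0
    rw [pvP_cons]
    by_cases hc : c = 'X' <;> simp [hc, List.filter, ih]

lemma pvLix_length : ∀ (p q : List (Char × Int)), p.map Prod.fst = q.map Prod.fst →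
    (pvLix p).length = (pvLix q).length ∧ (pvRixl p).length = (pvRixl q).length := by
  intro p
  induction p with
  | nil =>
    intro q h
    have : q = [] := List.map_eq_nil_iff.mp h.symm
    subst this; simp
  | cons x p' ih =>
    intro q h
    cases q with
    | nil => simp at h
    | cons y q' =>
      simp only [List.map_cons, List.cons.injEq] at h
      obtain ⟨h1, h2⟩ := h
      have hI := ih q' h2
      simp only [pvLix, pvRixl, List.filterMap_cons, ← h1] at *
      split_ifs <;> simp_all

-- range-indexed all over equal-length lists is a zip all
lemma pvRangeAll : ∀ (x y : List Int), y.length = x.length →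
    (List.range x.length).all (fun i => decide (y.getD i 0 ≤ x.getD i 0))
      = (y.zip x).all (fun ab => decide (ab.1 ≤ ab.2)) := by
  intro x
  induction x with
  | nil => intro y h; simp
  | cons a x' ih =>
    intro y h
    cases y with
    | nil => simp at h
    | cons b y' =>
      have ih' := ih y' (by simpa using h)
      simp only [List.length_cons, List.range_succ_eq_map, List.all_cons, List.all_map,
        List.zip_cons_cons]
      rw [← ih']
      simp [Function.comp_def, List.getD]
      rfl

-- the single zip-scan equals the two index-list comparisons, given equal char sequences
lemma pvMain : ∀ (p q : List (Char × Int)), p.map Prod.fst = q.map Prod.fst →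
    (p.zip q).all (fun pq =>
        pq.1.1 == pq.2.1 && (pq.2.1 != 'L' || decide (pq.2.2 ≤ pq.1.2))
                         && (pq.2.1 != 'R' || decide (pq.1.2 ≤ pq.2.2)))
      = (((pvLix q).zip (pvLix p)).all (fun ab => decide (ab.1 ≤ ab.2))
          && ((pvRixl p).zip (pvRixl q)).all (fun ab => decide (ab.1 ≤ ab.2))) := by
  intro p
  induction p with
  | nil =>
    intro q h
    have : q = [] := List.map_eq_nil_iff.mp h.symm
    subst this; simp [pvLix, pvRixl]
  | cons x p' ih =>
    intro q h
    cases q with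
    | nil => simp at h
    | cons y q' =>
      simp only [List.map_cons, List.cons.injEq] at h
      obtain ⟨h1, h2⟩ := h
      have hI := ih q' h2
      rw [List.zip_cons_cons, List.all_cons, hI]
      simp only [pvLix, pvRixl, List.filterMap_cons, ← h1]
      by_cases hL : x.1 = 'L'
      · simp [hL, Char.reduceEq, Bool.and_assoc, Bool.and_comm]
      · by_cases hR : x.1 = 'R'
        · simp [hR, Bool.and_left_comm]
        · simp [hL, hR]

-- with equal lengths but different char sequences the zip-scan rejects
lemma pvMismatch : ∀ (p q : List (Char × Int)), p.length = q.length →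
    p.map Prod.fst ≠ q.map Prod.fst →
    (p.zip q).all (fun pq =>
        pq.1.1 == pq.2.1 && (pq.2.1 != 'L' || decide (pq.2.2 ≤ pq.1.2))
                         && (pq.2.1 != 'R' || decide (pq.1.2 ≤ pq.2.2))) = false := by
  intro p
  induction p with
  | nil =>
    intro q hl h
    have : q = [] := by cases q <;> simp_all
    subst this; simp at h
  | cons x p' ih =>
    intro q hl h
    cases q with
    | nil => simp at hl
    | cons y q' =>
      rw [List.zip_cons_cons, List.all_cons]
      by_cases h1 : x.1 = y.1
      · have h2 : p'.map Prod.fst ≠ q'.map Prod.fst := by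
          intro hc; exact h (by simp [h1, hc])
        rw [ih q' (by simpa using hl) h2]
        simp
      · simp [h1]

-- ===== VERDICT (by name: the statement is the Claim_ definition above) =====
theorem canTransform_1_spec : Claim_equal_canTransform_1 := by
  intro start end_ _
  unfold Spec_canTransform_1
  unfold canTransform_1 canTransform_1_alt
  have hA : pvPlc start = (pvLix (pvP start.toList 0), pvRixl (pvP start.toList 0)) := by
    unfold pvPlc
    exact (pvPlc_fold start.toList 0 [] []).trans (by simp)
  have hB : pvPlc end_ = (pvLix (pvP end_.toList 0), pvRixl (pvP end_.toList 0)) := by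
    unfold pvPlc
    exact (pvPlc_fold end_.toList 0 [] []).trans (by simp)
  simp only [pvPairs_eq, hA, hB]
  by_cases hrx : pvRx start = pvRx end_
  · have hmap : (pvP start.toList 0).map Prod.fst = (pvP end_.toList 0).map Prod.fst := by
      rw [pvFst_pairs, pvFst_pairs, ← pvRx_toList, ← pvRx_toList, hrx]
    have hlen : (pvP start.toList 0).length = (pvP end_.toList 0).length := by
      have := congrArg List.length hmap
      simpa using this
    rw [if_neg (by simpa using hrx), if_neg (by simpa using hlen)]
    obtain ⟨hLlen, hRlen⟩ := pvLix_length _ _ hmap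
    rw [pvMain _ _ hmap]
    congr 1
    · exact pvRangeAll _ _ hLlen.symm
    · rw [show (pvRixl (pvP start.toList 0)).length = (pvRixl (pvP end_.toList 0)).length from hRlen]
      exact pvRangeAll _ _ hRlen
  · rw [if_pos (by simpa using hrx)]
    have hmap : (pvP start.toList 0).map Prod.fst ≠ (pvP end_.toList 0).map Prod.fst := by
      intro hc
      apply hrx
      rw [pvFst_pairs, pvFst_pairs] at hc
      apply String.ext_iff.mpr
      rw [pvRx_toList, pvRx_toList, hc]
    by_cases hlen : (pvP start.toList 0).length = (pvP end_.toList 0).length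
    · rw [if_neg (by simpa using hlen)]
      exact (pvMismatch _ _ hlen hmap).symm
    · rw [if_pos (by simpa using hlen)]
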